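-- pv_equiv track=rewrite | github.com/aimasibtain/Seekify-SearchEngine | algorithm.py | proximity_rank
-- ===== SOURCE A (Python) =====
-- def proximity_rank(doc, word_ids):
--     val = 0
--     if doc and all(word_ids[0] in doc for word_id in word_ids):
--         # Initialize with the positions of the first term
--         initial_positions = doc[word_ids[0]]
--
--         for pos_type, positions_list in initial_positions.get("p", {}).items():
--
--             # Iterate over each position of the first term
--             for pos in positions_list:
--                 valid_occurrence = True
--
--                 # Check if there are consecutive positions for the remaining terms
--                 for i, word_id in enumerate(word_ids[1:], start=1):
--                     if pos + i not in doc.get(word_id, {}).get("p", {}).get(pos_type, []):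
--                         valid_occurrence = False
--                         break  # No need to check further positions for this occurrence
--
--                 if valid_occurrence:
--                     val += 10  # Increment rank for each valid phrase occurrence
--
--     return min(val, 100)
-- ===== SOURCE B (Python) =====
-- def proximity_rank(doc, word_ids):
--     # B: per pos_type, fold an intersection over the remaining terms to get the
--     # set S of valid phrase-start positions, then count the first term's
--     # positions (with multiplicity) that lie in S.
--     if not doc or not word_ids or word_ids[0] not in doc:
--         return 0
--     val = 0
--     pmap = doc[word_ids[0]].get("p", {})
--     for pos_type, positions_list in pmap.items():
--         S = set(positions_list)
--         for i, word_id in enumerate(word_ids[1:], start=1):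
--             nxt = set(doc.get(word_id, {}).get("p", {}).get(pos_type, []))
--             S = {p for p in S if p + i in nxt}
--         val += 10 * sum(1 for p in positions_list if p in S)
--     return min(val, 100)
-- ===== Notes on version B (the rewrite author's own statement) =====
-- stated objective: alternative
-- what changed: Per pos_type, B folds a candidate-set intersection over the remaining terms (filtering valid phrase starts term by term) and then counts the first term's positions lying in that set, instead of A's per-position inner scan over all remaining terms.
-- outside the precondition, e.g. on proximity_rank({1: {'p': {'a': [0]}}}, []): A raises IndexError, B returns 0
-- crash fix: On a nonempty doc with empty word_ids A raises IndexError on word_ids[0]; B returns 0. — e.g. on proximity_rank([(1, [("p", [("0", [0])])])], []): A raises IndexError, B returns 0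
import Mathlib
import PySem

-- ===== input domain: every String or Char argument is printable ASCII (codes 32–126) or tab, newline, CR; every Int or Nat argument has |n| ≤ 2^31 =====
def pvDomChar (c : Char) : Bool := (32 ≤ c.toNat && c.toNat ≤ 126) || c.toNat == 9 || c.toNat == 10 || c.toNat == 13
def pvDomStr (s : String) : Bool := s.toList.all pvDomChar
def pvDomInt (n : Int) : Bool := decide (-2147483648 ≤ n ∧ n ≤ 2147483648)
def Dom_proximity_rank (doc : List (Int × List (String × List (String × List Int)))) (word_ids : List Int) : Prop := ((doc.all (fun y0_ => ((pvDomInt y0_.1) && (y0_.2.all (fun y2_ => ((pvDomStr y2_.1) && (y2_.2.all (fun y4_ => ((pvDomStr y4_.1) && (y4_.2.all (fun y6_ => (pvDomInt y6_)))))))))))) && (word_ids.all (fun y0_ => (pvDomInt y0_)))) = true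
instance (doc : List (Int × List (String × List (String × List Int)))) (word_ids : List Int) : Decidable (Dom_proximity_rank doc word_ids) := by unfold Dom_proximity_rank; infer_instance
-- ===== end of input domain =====

-- B replaces A's per-position inner scan over the remaining terms by a per-pos_type
-- intersection fold computing the set of valid phrase starts, then a separate counting
-- pass over the first term's positions (objective: alternative decomposition).

-- ===== PORT A =====
def proximity_rank (doc : List (Int × List (String × List (String × List Int)))) (word_ids : List Int) : Int :=
  let val : Int :=
    if doc = [] then 0
    else
      match PySem.List.pyGet? word_ids 0 with
      | none => 0  -- Python raises IndexError here (doc nonempty, word_ids empty); excluded by Pre_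
      | some w0 =>
        if word_ids.all (fun _ => (PySem.Dict.get? (PySem.Dict.mk doc) w0).isSome) then
          let initial_positions := (PySem.Dict.get? (PySem.Dict.mk doc) w0).getD []
          let pmap := PySem.Dict.getD (PySem.Dict.mk initial_positions) "p" []
          pmap.foldl (fun (val : Int) (ptl : String × List Int) =>
            ptl.2.foldl (fun val pos =>
              let valid_occurrence := ((word_ids.drop 1).zipIdx 1).all (fun (wi : Int × Nat) =>
                (PySem.Dict.getD (PySem.Dict.mk (PySem.Dict.getD (PySem.Dict.mk (PySem.Dict.getD (PySem.Dict.mk doc) wi.1 [])) "p" [])) ptl.1 []).contains (pos + (wi.2 : Int)))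
              if valid_occurrence then val + 10 else val) val) 0
        else 0
  min val 100

-- ===== PORT B =====
def proximity_rank_alt (doc : List (Int × List (String × List (String × List Int)))) (word_ids : List Int) : Int :=
  match word_ids with
  | [] => 0
  | w0 :: rest =>
    if doc = [] then 0
    else
      match PySem.Dict.get? (PySem.Dict.mk doc) w0 with
      | none => 0
      | some entry =>
        let pmap := PySem.Dict.getD (PySem.Dict.mk entry) "p" []
        let val : Int := pmap.foldl (fun (val : Int) (ptl : String × List Int) =>
          let S0 : PySem.Set Int := PySem.Set.ofList ptl.2
          let S := (rest.zipIdx 1).foldl (fun (S : PySem.Set Int) (wi : Int × Nat) =>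
            let nxt : PySem.Set Int := PySem.Set.ofList
              (PySem.Dict.getD (PySem.Dict.mk (PySem.Dict.getD (PySem.Dict.mk (PySem.Dict.getD (PySem.Dict.mk doc) wi.1 [])) "p" [])) ptl.1 [])
            PySem.Set.ofList (S.filter (fun p => nxt.contains (p + (wi.2 : Int))))) S0
          val + 10 * (ptl.2.countP (fun p => S.contains p))) 0
        min val 100

-- ===== PRECONDITION & SPEC =====
-- Pre_ excludes only doc ≠ [] with word_ids = [], where Python A raises IndexError on word_ids[0].
def Pre_proximity_rank (doc : List (Int × List (String × List (String × List Int)))) (word_ids : List Int) : Prop :=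
  doc = [] ∨ word_ids ≠ []
instance (doc : List (Int × List (String × List (String × List Int)))) (word_ids : List Int) : Decidable (Pre_proximity_rank doc word_ids) := by unfold Pre_proximity_rank; infer_instance
def pvWitness_proximity_rank : (List (Int × List (String × List (String × List Int)))) × List Int :=
  ([(1, [("p", [("0", [3, 4])])]), (2, [("p", [("0", [4])])])], [1, 2])

-- On doc ≠ [] with word_ids = [] Python A raises IndexError (word_ids[0]); B returns 0.
def Raises_proximity_rank (doc : List (Int × List (String × List (String × List Int)))) (word_ids : List Int) : Prop :=
  doc ≠ [] ∧ word_ids = []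
instance (doc : List (Int × List (String × List (String × List Int)))) (word_ids : List Int) : Decidable (Raises_proximity_rank doc word_ids) := by unfold Raises_proximity_rank; infer_instance
def pvRaiseWitness_proximity_rank : (List (Int × List (String × List (String × List Int)))) × List Int :=
  ([(1, [("p", [("0", [0])])])], [])
def pvRaiseWitnessOut_proximity_rank : Int := 0

def Spec_proximity_rank (doc : List (Int × List (String × List (String × List Int)))) (word_ids : List Int) (out : Int) : Prop := out = proximity_rank_alt doc word_ids
instance (doc : List (Int × List (String × List (String × List Int)))) (word_ids : List Int) (out : Int) : Decidable (Spec_proximity_rank doc word_ids out) := by unfold Spec_proximity_rank; infer_instance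

-- ===== CLAIM (what is proved, stated in full; the proofs are below) =====
def Claim_equal_proximity_rank : Prop := ∀ (doc : List (Int × List (String × List (String × List Int)))) (word_ids : List Int), Dom_proximity_rank doc word_ids → Pre_proximity_rank doc word_ids → Spec_proximity_rank doc word_ids (proximity_rank doc word_ids)
def Claim_raises_proximity_rank : Prop := (∀ (doc : List (Int × List (String × List (String × List Int)))) (word_ids : List Int), Dom_proximity_rank doc word_ids → Raises_proximity_rank doc word_ids → ¬ Pre_proximity_rank doc word_ids) ∧ (Dom_proximity_rank (pvRaiseWitness_proximity_rank.1) (pvRaiseWitness_proximity_rank.2) ∧ Raises_proximity_rank (pvRaiseWitness_proximity_rank.1) (pvRaiseWitness_proximity_rank.2) ∧ proximity_rank_alt (pvRaiseWitness_proximity_rank.1) (pvRaiseWitness_proximity_rank.2) = pvRaiseWitnessOut_proximity_rank)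

-- ===== LEMMAS AND PROOFS =====

-- membership after B's intersection fold: p survives iff it was in the initial set and
-- satisfies every step's consecutive-position condition
theorem memS_fold (steps : List (Int × Nat)) (cond : Int → (Int × Nat) → Bool)
    (S : PySem.Set Int) (p : Int) :
    (p ∈ steps.foldl (fun (S : PySem.Set Int) (wi : Int × Nat) =>
        PySem.Set.ofList (S.filter (fun q => cond q wi))) S)
      ↔ p ∈ S ∧ ∀ wi ∈ steps, cond p wi = true := by
  induction steps generalizing S with
  | nil => simp [List.foldl]
  | cons wi steps ih =>
    simp only [List.foldl_cons, ih, PySem.Set.mem_ofList, List.mem_filter,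
      List.forall_mem_cons]
    tauto

-- A's inner loop over positions is 10 × (count of valid positions)
theorem foldl_if_ten (pl : List Int) (valid : Int → Bool) (v : Int) :
    pl.foldl (fun val pos => if valid pos then val + 10 else val) v
      = v + 10 * (pl.countP valid) := by
  induction pl generalizing v with
  | nil => simp
  | cons pos pl ih =>
    by_cases h : valid pos = true
    · simp [List.foldl_cons, ih, h]; ring
    · simp [List.foldl_cons, ih, h]

-- ===== VERDICT (by name: the statement is the Claim_ definition above) =====
theorem proximity_rank_spec : Claim_equal_proximity_rank := by
  intro doc word_ids _dom hpre
  unfold Spec_proximity_rank proximity_rank proximity_rank_alt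
  cases word_ids with
  | nil =>
    rcases hpre with h | h
    · subst h; simp
    · exact absurd rfl h
  | cons w0 rest =>
    by_cases hd : doc = []
    · simp [hd]
    · simp only [hd, if_false]
      have hget : PySem.List.pyGet? (w0 :: rest) 0 = some w0 := by
        simp [PySem.List.pyGet?, PySem.List.pyIdx?]
      rw [hget]
      cases he : PySem.Dict.get? (PySem.Dict.mk doc) w0 with
      | none => simp [he, List.all_cons]
      | some entry =>
        simp only [he, Option.isSome_some, List.all_cons, Bool.true_and, Option.getD_some]
        have hall : rest.all (fun _ => true) = true := by simp
        rw [hall]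
        simp only [if_true]
        congr 1
        apply PySem.List.foldl_congr_mem
        intro val ptl _
        rw [foldl_if_ten]
        congr 1
        congr 1
        congr 1
        apply List.countP_congr
        intro p hp
        have hmem := memS_fold (rest.zipIdx 1)
          (fun q wi => (PySem.Set.ofList (PySem.Dict.getD (PySem.Dict.mk (PySem.Dict.getD (PySem.Dict.mk (PySem.Dict.getD (PySem.Dict.mk doc) wi.1 [])) "p" [])) ptl.1 [])).contains (q + (wi.2 : Int)))
          (PySem.Set.ofList ptl.2) p
        constructor
        · intro hv
          rw [PySem.Set.contains_iff, hmem]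
          refine ⟨(PySem.Set.mem_ofList _ _).mpr hp, ?_⟩
          intro wi hwi
          have := List.all_eq_true.mp hv wi hwi
          simpa [PySem.Set.contains_iff, List.contains_iff_mem, PySem.Set.mem_ofList] using this
        · intro hs
          rw [PySem.Set.contains_iff, hmem] at hs
          apply List.all_eq_true.mpr
          intro wi hwi
          have := hs.2 wi hwi
          simpa [PySem.Set.contains_iff, List.contains_iff_mem, PySem.Set.mem_ofList] using this

def proximity_rank_raises : Claim_raises_proximity_rank := by
  unfold Claim_raises_proximity_rank
  constructor
  · intro doc word_ids _ hr hp
    rcases hp with h | h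
    · exact hr.1 h
    · exact h hr.2
  · exact ⟨by decide, by decide, by decide⟩
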